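-- pv_equiv track=rewrite | github.com/vinamra1102/sqlite-forensic-recovery-tool | modules/Btree_parser.py | parse_varint
-- ===== SOURCE A (Python) =====
-- def parse_varint(data, offset):
--     value = 0
--     for i in range(9):
--         byte = data[offset + i]
--         value = (value << 7) | (byte & 0x7F)
--         if not (byte & 0x80):
--             return value, i + 1
--     return value, 9
-- ===== SOURCE B (Python) =====
-- def parse_varint(data, offset):
--     collected = []
--     for i in range(9):
--         b = data[offset + i]
--         collected.append(b)
--         if not (b & 0x80):
--             break
--     value = 0
--     for b in collected:
--         value = (value << 7) | (b & 0x7F)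
--     return value, len(collected)
-- ===== Notes on version B (the rewrite author's own statement) =====
-- stated objective: alternative
-- what changed: B splits A's single accumulate-and-return pass into two phases: first collect the consumed bytes into a list (stopping at the first byte with the high bit clear or after 9 bytes), then fold the collected list into the value and return its length as the byte count.
import Mathlib
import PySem

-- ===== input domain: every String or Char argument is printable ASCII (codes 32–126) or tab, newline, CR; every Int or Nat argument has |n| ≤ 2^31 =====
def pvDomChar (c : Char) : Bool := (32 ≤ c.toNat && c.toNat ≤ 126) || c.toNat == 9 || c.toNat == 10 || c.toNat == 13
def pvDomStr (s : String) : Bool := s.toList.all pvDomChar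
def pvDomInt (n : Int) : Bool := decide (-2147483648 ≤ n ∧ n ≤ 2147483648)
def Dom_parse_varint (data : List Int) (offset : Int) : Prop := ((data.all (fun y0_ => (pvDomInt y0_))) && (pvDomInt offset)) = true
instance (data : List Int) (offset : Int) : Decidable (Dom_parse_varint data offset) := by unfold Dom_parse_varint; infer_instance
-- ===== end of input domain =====

-- B rewrites A's single accumulate-as-you-go pass as two phases (collect the consumed bytes, then fold them
-- into the value); same return value, no speed claim.

-- ===== PORT A =====
-- A's loop: accumulate value while scanning, early return on a byte with the high bit clear.
def parse_varint_go (data : List Int) (offset : Int) (i : Nat) (value : Int) : Int × Int :=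
  if i < 9 then
    match PySem.List.pyGet? data (offset + (i : Int)) with
    | none => (0, 0)   -- IndexError in Python: outside Pre_parse_varint
    | some byte =>
      let v := PySem.Int.bor (value <<< (7 : Nat)) (PySem.Int.band byte 127)
      if PySem.Int.band byte 128 = 0 then (v, (i : Int) + 1)
      else parse_varint_go data offset (i + 1) v
  else (value, 9)
  termination_by 9 - i

def parse_varint (data : List Int) (offset : Int) : Int × Int :=
  parse_varint_go data offset 0 0

-- ===== PORT B =====
-- Phase 1 of B: the list of consumed bytes (none = IndexError in Python).
def collect_bytes (data : List Int) (offset : Int) (i : Nat) : Option (List Int) :=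
  if i < 9 then
    match PySem.List.pyGet? data (offset + (i : Int)) with
    | none => none     -- IndexError in Python: outside Pre_parse_varint
    | some b =>
      if PySem.Int.band b 128 = 0 then some [b]
      else (collect_bytes data offset (i + 1)).map (b :: ·)
  else some []
  termination_by 9 - i

def parse_varint_alt (data : List Int) (offset : Int) : Int × Int :=
  match collect_bytes data offset 0 with
  | none => (0, -1)    -- IndexError in Python: outside Pre_parse_varint
  | some cs =>
    (cs.foldl (fun v b => PySem.Int.bor (v <<< (7 : Nat)) (PySem.Int.band b 127)) 0,
     (cs.length : Int))

-- ===== PRECONDITION & SPEC =====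
-- Pre_: exactly the inputs on which Python A returns (no IndexError): some i < 9 such that all accesses
-- data[offset+0..offset+i] are in range and either byte i has the high bit clear (the loop stops there)
-- or i = 8 (the loop ends after nine bytes).
def Pre_parse_varint (data : List Int) (offset : Int) : Prop :=
  ∃ i : Nat, i < 9 ∧ (∀ j : Nat, j ≤ i → PySem.Raise.InRange data.length (offset + (j : Int))) ∧
    (PySem.Int.band ((PySem.List.pyGet? data (offset + (i : Int))).getD 0) 128 = 0 ∨ i = 8)
instance (data : List Int) (offset : Int) : Decidable (Pre_parse_varint data offset) := by
  unfold Pre_parse_varint; infer_instance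

def pvWitness_parse_varint : List Int × Int := ([129, 5], 0)

def Spec_parse_varint (data : List Int) (offset : Int) (out : Int × Int) : Prop := out = parse_varint_alt data offset
instance (data : List Int) (offset : Int) (out : Int × Int) : Decidable (Spec_parse_varint data offset out) := by unfold Spec_parse_varint; infer_instance

-- ===== CLAIM (what is proved, stated in full; the proofs are below) =====
def Claim_equal_parse_varint : Prop := ∀ (data : List Int) (offset : Int), Dom_parse_varint data offset → Pre_parse_varint data offset → Spec_parse_varint data offset (parse_varint data offset)

-- ===== LEMMAS AND PROOFS =====

-- A's running loop equals B's fold over the collected bytes, whenever collection succeeds.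
theorem go_eq_fold (data : List Int) (offset : Int) :
    ∀ (n i : Nat), 9 - i ≤ n → i ≤ 9 → ∀ (value : Int) (cs : List Int),
      collect_bytes data offset i = some cs →
      parse_varint_go data offset i value =
        (cs.foldl (fun v b => PySem.Int.bor (v <<< (7 : Nat)) (PySem.Int.band b 127)) value,
         (i : Int) + (cs.length : Int)) := by
  intro n
  induction n with
  | zero =>
    intro i hle h9' value cs hc
    have h9 : ¬ i < 9 := by omega
    rw [collect_bytes, if_neg h9] at hc
    rw [parse_varint_go, if_neg h9]
    cases hc
    simp; omega
  | succ n ih =>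
    intro i hle h9' value cs hc
    by_cases h9 : i < 9
    · rw [collect_bytes, if_pos h9] at hc
      rw [parse_varint_go, if_pos h9]
      cases hg : PySem.List.pyGet? data (offset + (i : Int)) with
      | none => simp only [hg] at hc; cases hc
      | some b =>
        simp only [hg] at hc ⊢
        by_cases hb : PySem.Int.band b 128 = 0
        · rw [if_pos hb] at hc
          cases hc
          simp [hb]
        · rw [if_neg hb] at hc
          cases hr : collect_bytes data offset (i + 1) with
          | none => rw [hr] at hc; cases hc
          | some rest =>
            rw [hr] at hc
            simp only [Option.map_some] at hc
            cases hc
            simp only [if_neg hb]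
            rw [ih (i + 1) (by omega) (by omega) _ rest hr]
            simp [List.foldl_cons]
            ring
    · rw [collect_bytes, if_neg h9] at hc
      rw [parse_varint_go, if_neg h9]
      cases hc
      simp; omega

-- Under Pre_, B's collection phase succeeds.
theorem collect_isSome (data : List Int) (offset : Int) (i0 : Nat) (h9 : i0 < 9)
    (hin : ∀ j : Nat, j ≤ i0 → PySem.Raise.InRange data.length (offset + (j : Int)))
    (hstop : PySem.Int.band ((PySem.List.pyGet? data (offset + (i0 : Int))).getD 0) 128 = 0 ∨ i0 = 8) :
    ∀ (k : Nat), k ≤ i0 → (collect_bytes data offset (i0 - k)).isSome := by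
  intro k
  induction k with
  | zero =>
    intro _
    have hi : PySem.Raise.InRange data.length (offset + (i0 : Int)) := hin i0 le_rfl
    obtain ⟨b, hb⟩ := Option.ne_none_iff_exists'.mp (fun hnone => ((PySem.List.pyGet?_eq_none_iff _ _).mp hnone) hi)
    rw [Nat.sub_zero, collect_bytes, if_pos h9]
    simp only [hb]
    by_cases hband : PySem.Int.band b 128 = 0
    · simp [hband]
    · have h8 : i0 = 8 := by
        rcases hstop with hs | hs
        · exfalso; rw [hb] at hs; exact hband hs
        · exact hs
      rw [if_neg hband]
      have : collect_bytes data offset (i0 + 1) = some [] := by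
        rw [collect_bytes, if_neg (by omega)]
      simp [this]
  | succ k ih =>
    intro hk
    have hlt : i0 - (k + 1) < 9 := by omega
    have hi : PySem.Raise.InRange data.length (offset + ((i0 - (k + 1) : Nat) : Int)) :=
      hin _ (by omega)
    obtain ⟨b, hb⟩ := Option.ne_none_iff_exists'.mp (fun hnone => ((PySem.List.pyGet?_eq_none_iff _ _).mp hnone) hi)
    rw [collect_bytes, if_pos hlt]
    simp only [hb]
    by_cases hband : PySem.Int.band b 128 = 0
    · simp [hband]
    · rw [if_neg hband]
      have hsucc : i0 - (k + 1) + 1 = i0 - k := by omega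
      rw [hsucc]
      have := ih (by omega)
      obtain ⟨cs, hcs⟩ := Option.isSome_iff_exists.mp this
      simp [hcs]

-- ===== VERDICT (by name: the statement is the Claim_ definition above) =====
theorem parse_varint_spec : Claim_equal_parse_varint := by
  intro data offset _ hpre
  obtain ⟨i0, h9, hin, hstop⟩ := hpre
  have hs := collect_isSome data offset i0 h9 hin hstop i0 le_rfl
  rw [Nat.sub_self] at hs
  obtain ⟨cs, hcs⟩ := Option.isSome_iff_exists.mp hs
  unfold Spec_parse_varint parse_varint parse_varint_alt
  rw [hcs, go_eq_fold data offset 9 0 (by omega) (by omega) 0 cs hcs]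
  simp
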